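-- pv_equiv track=rewrite | github.com/aviswerdlow/k4 | 05_ARCHIVE/05_ARCHIVE/pipelines/pipeline_v4/scripts/run_confirm_batch.py | tokenize_v2
-- ===== SOURCE A (Python) =====
-- from typing import Dict, List, Optional, Tuple
--
-- def tokenize_v2(text: str) -> List[str]:
--     """Tokenization v2 - extract known words from continuous text."""
--     words = []
--     text = text.upper()
--
--     vocab = ["ON", "THEN", "READ", "THE", "THIS", "AND", "EAST", "NORTHEAST",
--              "THERE", "WOULD", "AS", "OUR", "YOUR", "WHERE", "THAT", "BE",
--              "THEM", "FOLLOW", "WITH", "BERLIN", "CLOCK", "HERE", "HE", "HIM",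
--              "TO", "A", "IN", "OF", "IT", "IS", "WAS", "FOR", "FROM", "BY"]
--
--     vocab_sorted = sorted(vocab, key=len, reverse=True)
--
--     i = 0
--     while i < len(text):
--         matched = False
--         for word in vocab_sorted:
--             if text[i:i+len(word)] == word:
--                 words.append(word)
--                 i += len(word)
--                 matched = True
--                 break
--         if not matched:
--             i += 1
--
--     return words
-- ===== SOURCE B (Python) =====
-- # B: greedy longest match driven by a precomputed prefix map (a flattened trie):
-- # per position a single character-by-character descent through vocab prefixes,
-- # instead of A's scan of the whole length-sorted vocab at every position.
--
-- _VOCAB = ["ON", "THEN", "READ", "THE", "THIS", "AND", "EAST", "NORTHEAST",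
--           "THERE", "WOULD", "AS", "OUR", "YOUR", "WHERE", "THAT", "BE",
--           "THEM", "FOLLOW", "WITH", "BERLIN", "CLOCK", "HERE", "HE", "HIM",
--           "TO", "A", "IN", "OF", "IT", "IS", "WAS", "FOR", "FROM", "BY"]
--
-- # prefix -> "this prefix is itself a vocab word" (terminal marker of the trie node)
-- _PREF = {}
-- for _w in _VOCAB:
--     for _k in range(1, len(_w) + 1):
--         _p = _w[:_k]
--         _PREF[_p] = _PREF.get(_p, False) or (_k == len(_w))
--
--
-- def tokenize_v2(text):
--     """Tokenization v2 - extract known words from continuous text."""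
--     text = text.upper()
--     words = []
--     i = 0
--     n = len(text)
--     while i < n:
--         # descend the prefix trie from position i, remembering the deepest terminal
--         best = 0
--         p = ""
--         j = i
--         while j < n:
--             p = p + text[j]
--             node = _PREF.get(p)
--             if node is None:
--                 break
--             j += 1
--             if node:
--                 best = j - i
--         if best:
--             words.append(text[i:i + best])
--             i += best
--         else:
--             i += 1
--     return words
-- ===== Notes on version B (the rewrite author's own statement) =====
-- stated objective: faster
-- what changed: B precomputes a prefix trie of the vocab (flattened to a prefix->terminal map) and at each position runs one character-by-character automaton descent that tracks the deepest terminal reached, instead of A's scan of the whole length-sorted vocab list with a fresh slice comparison per word at every position.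
import Mathlib
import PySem

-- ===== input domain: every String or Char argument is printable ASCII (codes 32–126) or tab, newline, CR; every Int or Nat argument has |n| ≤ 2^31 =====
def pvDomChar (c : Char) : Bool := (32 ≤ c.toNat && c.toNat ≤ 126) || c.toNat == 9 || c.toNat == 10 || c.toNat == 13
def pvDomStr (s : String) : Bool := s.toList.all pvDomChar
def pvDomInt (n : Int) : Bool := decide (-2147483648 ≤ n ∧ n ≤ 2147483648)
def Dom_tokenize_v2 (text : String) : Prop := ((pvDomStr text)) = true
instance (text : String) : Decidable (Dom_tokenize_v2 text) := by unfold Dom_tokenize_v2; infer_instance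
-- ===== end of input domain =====

-- B replaces A's per-position scan of the length-sorted vocab list with one
-- character-by-character descent through a precomputed prefix trie (flattened to a
-- prefix → terminal map), tracking the deepest terminal reached (objective: faster
-- by a constant factor).

-- ===== PORT A =====
-- the vocab literal of A
def pvVocabA : List String := ["ON", "THEN", "READ", "THE", "THIS", "AND", "EAST", "NORTHEAST",
  "THERE", "WOULD", "AS", "OUR", "YOUR", "WHERE", "THAT", "BE",
  "THEM", "FOLLOW", "WITH", "BERLIN", "CLOCK", "HERE", "HE", "HIM",
  "TO", "A", "IN", "OF", "IT", "IS", "WAS", "FOR", "FROM", "BY"]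

-- sorted(vocab, key=len, reverse=True)
def pvVocabSortedA : List String := PySem.List.sorted pvVocabA (fun w => PySem.Str.len w) true

-- the 'while i < len(text)' loop, over the remaining suffix of the text; the inner
-- 'for word in vocab_sorted: if text[i:i+len(word)] == word: … break' is find?; the
-- string comparison is done on the char-list side (exact for Python's str equality)
def pvLoopA (rest : List Char) : List String :=
  if _h : rest.isEmpty then []
  else
    match _hf : pvVocabSortedA.find? (fun w => rest.take w.toList.length == w.toList) with
    | some w => w :: pvLoopA (rest.drop w.toList.length)
    | none => pvLoopA (rest.drop 1)
termination_by rest.length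
decreasing_by
  · have hw := List.mem_of_find?_eq_some _hf
    have hpos : ∀ w ∈ pvVocabSortedA, 0 < w.toList.length := by decide
    have h1 := hpos _ hw
    have h2 : rest ≠ [] := by simpa using _h
    have h3 : 0 < rest.length := List.length_pos_iff.mpr h2
    simp only [List.length_drop]; omega
  · have h2 : rest ≠ [] := by simpa using _h
    have h3 : 0 < rest.length := List.length_pos_iff.mpr h2
    simp only [List.length_drop]; omega

def tokenize_v2 (text : String) : List String :=
  pvLoopA (PySem.Str.upper text).toList

-- ===== PORT B =====
-- the vocab literal of B
def pvVocabB : List String := ["ON", "THEN", "READ", "THE", "THIS", "AND", "EAST", "NORTHEAST",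
  "THERE", "WOULD", "AS", "OUR", "YOUR", "WHERE", "THAT", "BE",
  "THEM", "FOLLOW", "WITH", "BERLIN", "CLOCK", "HERE", "HE", "HIM",
  "TO", "A", "IN", "OF", "IT", "IS", "WAS", "FOR", "FROM", "BY"]

-- the module-level build of _PREF: for _w in _VOCAB: for _k in range(1, len(_w)+1):
--   _PREF[_w[:_k]] = _PREF.get(_w[:_k], False) or (_k == len(_w))
def pvPrefB : PySem.Dict String Bool :=
  pvVocabB.foldl (fun d w =>
    (PySem.List.pyRange 1 (PySem.Str.len w + 1) 1).foldl (fun d k =>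
      let p := PySem.Str.slice w none (some k)
      d.insert p (d.getD p false || decide (k = PySem.Str.len w))) d)
    PySem.Dict.empty

-- the inner 'while j < n' descent: p grows one char at a time (p = p + text[j]),
-- _PREF.get(p) drives the walk, best = j - i records the deepest terminal; the
-- growing prefix is kept as a char list (Python's str concat, exact)
def pvWalkB (pref : PySem.Dict String Bool) (rem : List Char) (p : List Char)
    (depth best : Nat) : Nat :=
  match rem with
  | [] => best
  | c :: rem' =>
    let p' := p ++ [c]
    match pref.get? (String.ofList p') with
    | none => best
    | some t => pvWalkB pref rem' p' (depth + 1) (if t then depth + 1 else best)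

-- the outer 'while i < n' loop over the remaining suffix; text[i:i+best] is the
-- first best chars of the suffix (exact: 0 ≤ best ≤ len)
def pvLoopB (rest : List Char) : List String :=
  if _h : rest.isEmpty then []
  else
    let best := pvWalkB pvPrefB rest [] 0 0
    if _hb : 0 < best then
      String.ofList (rest.take best) :: pvLoopB (rest.drop best)
    else
      pvLoopB (rest.drop 1)
termination_by rest.length
decreasing_by
  all_goals
    have h2 : rest ≠ [] := by simpa using _h
    have h3 : 0 < rest.length := List.length_pos_iff.mpr h2
    simp only [List.length_drop]
    omega

def tokenize_v2_alt (text : String) : List String :=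
  pvLoopB (PySem.Str.upper text).toList

-- ===== PRECONDITION & SPEC =====
def Spec_tokenize_v2 (text : String) (out : List String) : Prop := out = tokenize_v2_alt text
instance (text : String) (out : List String) : Decidable (Spec_tokenize_v2 text out) := by unfold Spec_tokenize_v2; infer_instance

-- ===== CLAIM (what is proved, stated in full; the proofs are below) =====
def Claim_equal_tokenize_v2 : Prop := ∀ (text : String), Dom_tokenize_v2 text → Spec_tokenize_v2 text (tokenize_v2 text)

-- ===== LEMMAS AND PROOFS =====

-- the sorted vocab as char lists: the list A's step function is really about
def pvV : List (List Char) := pvVocabSortedA.map String.toList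

-- descending list of candidate lengths [n, n-1, …, 1]
def pvDesc : Nat → List Nat
  | 0 => []
  | n + 1 => (n + 1) :: pvDesc n

-- 'position k of s starts a vocab match of length k'
def pvHit (s : List Char) (k : Nat) : Bool := pvV.contains (s.take k)

-- the global best-match length at the head of s (0 = no match), as A computes it
def pvBest (s : List Char) : Nat :=
  match (pvDesc 9).find? (fun k => pvHit s k) with
  | none => 0
  | some L => min L s.length

-- taking min (a, |s|) characters is taking a characters
theorem pv_take_min (s : List Char) (a : Nat) : s.take (min a s.length) = s.take a := by
  rcases le_total a s.length with h | h
  · rw [Nat.min_eq_left h]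
  · rw [Nat.min_eq_right h, List.take_of_length_le h, List.take_length]

-- in a list sorted by descending length, find? returns w when w matches and every
-- at-least-as-long match equals w
theorem pv_find?_top (p : List Char → Bool) (V : List (List Char)) (w : List Char)
    (hsort : V.Pairwise (fun a b => b.length ≤ a.length))
    (hw : w ∈ V) (hpw : p w = true)
    (huniq : ∀ w' ∈ V, p w' = true → w.length ≤ w'.length → w' = w) :
    V.find? p = some w := by
  induction V with
  | nil => cases hw
  | cons a t ih =>
    have hsa := List.pairwise_cons.mp hsort
    rcases List.mem_cons.mp hw with rfl | hwt
    · rw [List.find?_cons_of_pos hpw]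
    · have hlen : w.length ≤ a.length := hsa.1 w hwt
      by_cases hpa : p a = true
      · have ha : a = w := huniq a (List.mem_cons_self ..) hpa hlen
        subst ha
        rw [List.find?_cons_of_pos hpa]
      · rw [List.find?_cons_of_neg (by simpa using hpa)]
        exact ih hsa.2 hwt (fun w' h1 h2 h3 => huniq w' (List.mem_cons_of_mem _ h1) h2 h3)

-- A's linear scan of the length-sorted vocab equals the descending-length prefix search
theorem pv_key (s : List Char) : ∀ (n : Nat) (V : List (List Char)),
    (∀ w ∈ V, 0 < w.length) →
    V.Pairwise (fun a b => b.length ≤ a.length) →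
    (∀ w ∈ V, w <+: s → w.length ≤ n) →
    V.find? (fun w => s.take w.length == w)
      = ((pvDesc n).find? (fun L => V.contains (s.take L))).map (fun L => s.take L) := by
  intro n
  induction n with
  | zero =>
    intro V hpos _ hbound
    have hL : V.find? (fun w => s.take w.length == w) = none := by
      apply List.find?_eq_none.mpr
      intro w hwV hpw
      have he : s.take w.length = w := by simpa using hpw
      have hpre : w <+: s := List.prefix_iff_eq_take.mpr he.symm
      have hb := hbound w hwV hpre
      have hp := hpos w hwV
      omega
    rw [hL, pvDesc]
    rfl
  | succ n ih =>
    intro V hpos hsort hbound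
    by_cases hc : s.take (n + 1) ∈ V
    · have hfound : (pvDesc (n + 1)).find? (fun L => V.contains (s.take L)) = some (n + 1) := by
        rw [pvDesc, List.find?_cons_of_pos (by simpa using hc)]
      rw [hfound]
      simp only [Option.map_some]
      apply pv_find?_top _ V (s.take (n + 1)) hsort hc
      · simp [List.length_take, pv_take_min]
      · intro w' hw' hpw' hlen
        have he : s.take w'.length = w' := by simpa using hpw'
        have h1 : w'.length ≤ s.length := by
          have := congrArg List.length he
          simp only [List.length_take] at this
          omega
        have hpre : w' <+: s := List.prefix_iff_eq_take.mpr he.symm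
        have h2 : w'.length ≤ n + 1 := hbound w' hw' hpre
        have h3 : (s.take (n + 1)).length = min (n + 1) s.length := List.length_take
        rw [h3] at hlen
        have h4 : w'.length = min (n + 1) s.length := by omega
        rw [← he, h4, pv_take_min]
    · rw [pvDesc, List.find?_cons_of_neg (by simpa using hc)]
      apply ih V hpos hsort
      intro w hwV hpre
      have h2 := hbound w hwV hpre
      rcases Nat.lt_or_ge w.length (n + 1) with h | h
      · omega
      · exfalso
        have hw : w.length = n + 1 := by omega
        have he := List.prefix_iff_eq_take.mp hpre
        rw [hw] at he
        exact hc (he ▸ hwV)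

-- A's inner scan, moved from strings to char lists
theorem pv_stepA (rest : List Char) :
    pvVocabSortedA.find? (fun w => rest.take w.toList.length == w.toList)
      = (pvV.find? (fun u => rest.take u.length == u)).map String.ofList := by
  have h1 : pvVocabSortedA = pvV.map String.ofList := by
    simp [pvV, List.map_map, Function.comp_def]
  rw [h1, List.find?_map]
  simp [Function.comp_def]

-- ---- characterizing find? on the descending list pvDesc ----

theorem pv_find_desc_none (n : Nat) (P : Nat → Bool) :
    (pvDesc n).find? P = none ↔ ∀ k, 1 ≤ k → k ≤ n → P k = false := by
  induction n with
  | zero =>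
    simp only [pvDesc, List.find?_nil, true_iff]
    intro k h1 h2; omega
  | succ n ih =>
    rw [pvDesc]
    by_cases h : P (n + 1) = true
    · rw [List.find?_cons_of_pos h]
      constructor
      · intro hs; simp at hs
      · intro hall
        have := hall (n + 1) (by omega) (by omega)
        rw [h] at this; cases this
    · have hf : P (n + 1) = false := by simpa using h
      rw [List.find?_cons_of_neg (by simpa using h), ih]
      constructor
      · intro hall k h1 h2
        rcases Nat.lt_or_ge k (n + 1) with hk | hk
        · exact hall k h1 (by omega)
        · have : k = n + 1 := by omega
          subst this; exact hf
      · intro hall k h1 h2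
        exact hall k h1 (by omega)

theorem pv_find_desc_some (n : Nat) (P : Nat → Bool) (L : Nat) :
    (pvDesc n).find? P = some L ↔
      (1 ≤ L ∧ L ≤ n ∧ P L = true ∧ ∀ k, L < k → k ≤ n → P k = false) := by
  induction n with
  | zero =>
    simp only [pvDesc, List.find?_nil]
    constructor
    · intro hs; simp at hs
    · rintro ⟨h1, h2, _, _⟩; omega
  | succ n ih =>
    rw [pvDesc]
    by_cases h : P (n + 1) = true
    · rw [List.find?_cons_of_pos h]
      constructor
      · intro hs
        injection hs with hs; subst hs
        exact ⟨by omega, by omega, h, fun k h1 h2 => by omega⟩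
      · rintro ⟨h1, h2, h3, h4⟩
        rcases Nat.lt_or_ge L (n + 1) with hL | hL
        · have := h4 (n + 1) (by omega) (by omega)
          rw [h] at this; cases this
        · have : L = n + 1 := by omega
          subst this; rfl
    · have hf : P (n + 1) = false := by simpa using h
      rw [List.find?_cons_of_neg (by simpa using h), ih]
      constructor
      · rintro ⟨h1, h2, h3, h4⟩
        refine ⟨h1, by omega, h3, fun k hk1 hk2 => ?_⟩
        rcases Nat.lt_or_ge k (n + 1) with hk | hk
        · exact h4 k hk1 (by omega)
        · have : k = n + 1 := by omega
          subst this; exact hf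
      · rintro ⟨h1, h2, h3, h4⟩
        have hLn : L ≤ n := by
          rcases Nat.lt_or_ge L (n + 1) with hL | hL
          · omega
          · have : L = n + 1 := by omega
            subst this; rw [h3] at hf; cases hf
        exact ⟨h1, hLn, h3, fun k hk1 hk2 => h4 k hk1 (by omega)⟩

-- ---- the prefix dictionary: lookup characterization ----

-- generic association-list lookup, for a literal dict all of whose values record
-- vocab membership of the key
theorem pv_lookup_mk (L : List (String × Bool))
    (hv : ∀ e ∈ L, e.2 = decide (e.1 ∈ pvVocabA)) (p : String) :
    (PySem.Dict.mk L).get? p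
      = if (L.map Prod.fst).contains p then some (decide (p ∈ pvVocabA)) else none := by
  induction L with
  | nil => simp [PySem.Dict.get?]
  | cons e t ih =>
    obtain ⟨k, v⟩ := e
    rw [PySem.Dict.get?_mk_cons]
    have hvk : v = decide (k ∈ pvVocabA) := hv (k, v) (List.mem_cons_self ..)
    by_cases hk : k = p
    · subst hk
      simp [hvk]
    · have hne : (k == p) = false := by simpa using hk
      rw [if_neg (by simpa using hk), ih (fun e he => hv e (List.mem_cons_of_mem _ he))]
      simp [Ne.symm hk]

set_option maxRecDepth 40000 in
theorem pv_pref_get? (p : String) :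
    pvPrefB.get? p
      = if pvPrefB.keys.contains p then some (decide (p ∈ pvVocabA)) else none := by
  have hmk : pvPrefB = PySem.Dict.mk pvPrefB.items := rfl
  have hkeys : pvPrefB.keys = pvPrefB.items.map Prod.fst := rfl
  rw [hkeys, hmk]
  exact pv_lookup_mk _ (by decide) p

-- vocab membership as a char-list fact
theorem pv_memV (u : List Char) : (String.ofList u ∈ pvVocabA) ↔ u ∈ pvV := by
  constructor
  · intro h
    have h2 : String.ofList u ∈ pvVocabSortedA := (PySem.List.mem_sorted _ _ _ _).mpr h
    exact List.mem_map.mpr ⟨_, h2, by simp⟩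
  · intro h
    rcases List.mem_map.mp h with ⟨w, hwmem, rfl⟩
    have hww : String.ofList w.toList = w := by simp
    rw [hww]
    exact (PySem.List.mem_sorted _ _ _ _).mp hwmem

theorem pv_memV_decide (u : List Char) :
    decide (String.ofList u ∈ pvVocabA) = pvV.contains u := by
  rw [Bool.eq_iff_iff]
  simpa [List.contains_iff_mem] using pv_memV u

-- every vocab word is a key of the prefix dict
set_option maxRecDepth 40000 in
theorem pv_vocab_key : ∀ w ∈ pvVocabA, pvPrefB.keys.contains w = true := by decide

-- the key set is prefix-closed (for prefix lengths 1..9, which covers all keys)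
set_option maxRecDepth 40000 in
theorem pv_key_closed : ∀ q ∈ pvPrefB.keys, ∀ m ∈ List.range 10, 1 ≤ m →
    pvPrefB.keys.contains (String.ofList (q.toList.take m)) = true := by decide

-- if a vocab match of length k starts at s's head, every nonempty prefix of it
-- (of length m ≤ min k |s|) is a key
theorem pv_prefix_in_keys (s : List Char) (k m : Nat) (hk : pvHit s k = true)
    (h1 : 1 ≤ m) (h2 : m ≤ k) (h3 : m ≤ 9) :
    pvPrefB.keys.contains (String.ofList (s.take m)) = true := by
  have hmem : s.take k ∈ pvV := by
    have := hk
    unfold pvHit at this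
    simpa [List.contains_iff_mem] using this
  have hstr : String.ofList (s.take k) ∈ pvVocabA := (pv_memV _).mpr hmem
  have hkey := pv_vocab_key _ hstr
  have := pv_key_closed _ ((List.contains_iff_mem).mp hkey) m
    (List.mem_range.mpr (by omega)) h1
  have htt : (String.ofList (s.take k)).toList = s.take k := by simp
  rw [htt] at this
  have h4 : (s.take k).take m = s.take m := by
    rw [List.take_take, Nat.min_eq_left h2]
  rw [h4] at this
  exact this

-- basic decidable facts about the vocab as char lists
theorem pv_len_le_9 : ∀ w ∈ pvV, w.length ≤ 9 := by decide
theorem pv_len_pos : ∀ w ∈ pvV, 0 < w.length := by decide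
set_option maxRecDepth 40000 in
theorem pv_sorted : pvV.Pairwise (fun a b => b.length ≤ a.length) := by decide

-- no hit longer than 9 at full length (vocab words have length ≤ 9)
theorem pv_hit_le (s : List Char) (k : Nat) (hk : pvHit s k = true) (hks : k ≤ s.length) :
    k ≤ 9 := by
  have hmem : s.take k ∈ pvV := by
    have := hk; unfold pvHit at this
    simpa [List.contains_iff_mem] using this
  have := pv_len_le_9 _ hmem
  rw [List.length_take, Nat.min_eq_left hks] at this
  exact this

set_option maxRecDepth 40000 in
theorem pv_hit_zero (s : List Char) : pvHit s 0 = false := by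
  unfold pvHit
  simp [List.take_zero]
  decide

-- best match among depths ≤ d (what 'best' holds when the walk is at depth d)
def pvBestUpTo (s : List Char) (d : Nat) : Nat :=
  match (pvDesc 9).find? (fun k => decide (k ≤ d) && pvHit s k) with
  | none => 0
  | some L => L

-- the walk invariant: from depth d with the prefix-so-far and the best-so-far,
-- the descent computes the global best match length
set_option maxRecDepth 4000 in
theorem pv_walk_inv (s : List Char) : ∀ (rem : List Char) (d : Nat),
    rem = s.drop d → d ≤ s.length →
    pvWalkB pvPrefB rem (s.take d) d (pvBestUpTo s d) = pvBest s := by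
  intro rem
  induction rem with
  | nil =>
    intro d hrem hd
    have hdl : d = s.length := by
      have := congrArg List.length hrem
      simp only [List.length_nil, List.length_drop] at this
      omega
    subst hdl
    rw [pvWalkB]
    unfold pvBestUpTo pvBest
    rcases hfind : (pvDesc 9).find? (fun k => pvHit s k) with _ | L
    · have hnone := (pv_find_desc_none _ _).mp hfind
      have hg : (pvDesc 9).find? (fun k => decide (k ≤ s.length) && pvHit s k) = none := by
        rw [pv_find_desc_none]
        intro k h1 h2
        rw [hnone k h1 h2]
        simp
      rw [hg]
    · obtain ⟨hL1, hL9, hPL, hAfter⟩ := (pv_find_desc_some _ _ _).mp hfind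
      by_cases hLs : L ≤ s.length
      · have hg : (pvDesc 9).find? (fun k => decide (k ≤ s.length) && pvHit s k)
            = some L := by
          rw [pv_find_desc_some]
          exact ⟨hL1, hL9, by simp [hLs, hPL], fun k hk1 hk2 => by
            rw [hAfter k hk1 hk2]; simp⟩
        rw [hg]
        show L = min L s.length
        exact (Nat.min_eq_left hLs).symm
      · -- L exceeds |s|: the match is all of s
        have hsl : s.take L = s := List.take_of_length_le (by omega)
        have hhs : pvHit s s.length = true := by
          unfold pvHit at hPL ⊢
          rw [List.take_length]
          rwa [hsl] at hPL
        have hs1 : 1 ≤ s.length := by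
          by_contra h
          have h0 : s.length = 0 := by omega
          have hz := pv_hit_zero s
          rw [← h0] at hz
          rw [hz] at hhs
          cases hhs
        have hg : (pvDesc 9).find? (fun k => decide (k ≤ s.length) && pvHit s k)
            = some s.length := by
          rw [pv_find_desc_some]
          refine ⟨hs1, by omega, by simp [hhs], fun k hk1 hk2 => by
            simp [Nat.not_le.mpr hk1]⟩
        rw [hg]
        show s.length = min L s.length
        exact (Nat.min_eq_right (by omega)).symm
  | cons c rem' ih =>
    intro d hrem hd
    have hdlt : d < s.length := by
      have := congrArg List.length hrem
      simp only [List.length_cons, List.length_drop] at this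
      omega
    have hget : s[d]? = some c := by
      rw [← List.head?_drop, ← hrem]
      rfl
    have htake : s.take (d + 1) = s.take d ++ [c] := by
      rw [List.take_add_one, hget]
      rfl
    have hrem' : rem' = s.drop (d + 1) := by
      have h1 : s.drop (d + 1) = (s.drop d).drop 1 := by
        rw [List.drop_drop]
      rw [h1, ← hrem]
      rfl
    rw [pvWalkB]
    simp only [← htake]
    rw [pv_pref_get? (String.ofList (s.take (d + 1)))]
    have hdec : decide (String.ofList (s.take (d + 1)) ∈ pvVocabA) = pvHit s (d + 1) := by
      rw [pv_memV_decide]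
      rfl
    by_cases hcon : pvPrefB.keys.contains (String.ofList (s.take (d + 1))) = true
    · -- key present: descend
      rw [if_pos hcon, hdec]
      show pvWalkB pvPrefB rem' (s.take (d + 1)) (d + 1)
          (if pvHit s (d + 1) then d + 1 else pvBestUpTo s d) = pvBest s
      have hbest : (if pvHit s (d + 1) then d + 1 else pvBestUpTo s d)
          = pvBestUpTo s (d + 1) := by
        by_cases ht : pvHit s (d + 1) = true
        · rw [if_pos ht]
          have h9 : d + 1 ≤ 9 := pv_hit_le s (d + 1) ht (by omega)
          have hg : (pvDesc 9).find? (fun k => decide (k ≤ d + 1) && pvHit s k)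
              = some (d + 1) := by
            rw [pv_find_desc_some]
            exact ⟨by omega, h9, by simp [ht], fun k hk1 hk2 => by
              simp [Nat.not_le.mpr hk1]⟩
          unfold pvBestUpTo
          rw [hg]
        · have htf : pvHit s (d + 1) = false := by simpa using ht
          rw [if_neg (by simp [htf])]
          have hfun : (fun k => decide (k ≤ d) && pvHit s k)
              = (fun k => decide (k ≤ d + 1) && pvHit s k) := by
            funext k
            by_cases hk : k ≤ d
            · simp [hk, (by omega : k ≤ d + 1)]
            · by_cases hk1 : k = d + 1
              · subst hk1
                simp [htf]
              · have hn : ¬ (k ≤ d + 1) := by omega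
                simp [hk]
                exact fun h => absurd h hn
          unfold pvBestUpTo
          rw [hfun]
      rw [hbest]
      exact ih (d + 1) hrem' (by omega)
    · -- key absent: no longer match can start at this position
      rw [if_neg hcon]
      show pvBestUpTo s d = pvBest s
      have hnohit : ∀ k, d < k → pvHit s k = false := by
        intro k hk
        by_contra hth
        have hth' : pvHit s k = true := by simpa using hth
        have hmem : s.take k ∈ pvV := by
          have := hth'
          unfold pvHit at this
          simpa [List.contains_iff_mem] using this
        have hlen : (s.take k).length ≤ 9 := pv_len_le_9 _ hmem
        rw [List.length_take] at hlen
        have h9 : d + 1 ≤ 9 := by omega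
        exact hcon (pv_prefix_in_keys s k (d + 1) hth' (by omega) (by omega) h9)
      have hfun : (fun k => pvHit s k) = (fun k => decide (k ≤ d) && pvHit s k) := by
        funext k
        by_cases hk : k ≤ d
        · simp [hk]
        · rw [hnohit k (by omega)]
          simp
      unfold pvBest pvBestUpTo
      rw [hfun]
      rcases hfind : (pvDesc 9).find? (fun k => decide (k ≤ d) && pvHit s k) with _ | L
      · rfl
      · obtain ⟨hL1, hL9, hPL, _⟩ := (pv_find_desc_some _ _ _).mp hfind
        have hLd : L ≤ d := by
          by_contra h
          simp [Nat.not_le.mpr (by omega : d < L)] at hPL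
        show L = min L s.length
        exact (Nat.min_eq_left (by omega)).symm

theorem pv_walk_eq (s : List Char) : pvWalkB pvPrefB s [] 0 0 = pvBest s := by
  have h0 : pvBestUpTo s 0 = 0 := by
    unfold pvBestUpTo
    have : (pvDesc 9).find? (fun k => decide (k ≤ 0) && pvHit s k) = none := by
      rw [pv_find_desc_none]
      intro k h1 h2
      simp [Nat.not_le.mpr (by omega : 0 < k)]
    rw [this]
  have := pv_walk_inv s s 0 rfl (by omega)
  simpa [h0] using this

-- ---- loop equality ----

theorem pv_loop_eq_fuel : ∀ (n : Nat) (rest : List Char), rest.length ≤ n →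
    pvLoopA rest = pvLoopB rest := by
  intro n
  induction n with
  | zero =>
    intro rest h
    have hnil : rest = [] := by
      cases rest with
      | nil => rfl
      | cons a t => simp at h
    subst hnil
    rw [pvLoopA.eq_def, pvLoopB.eq_def]
    simp
  | succ n ih =>
    intro rest hlen
    by_cases hne : rest = []
    · subst hne
      rw [pvLoopA.eq_def, pvLoopB.eq_def]
      simp
    · have hlp : 0 < rest.length := List.length_pos_iff.mpr hne
      have hkey := pv_key rest 9 pvV pv_len_pos pv_sorted (fun w hw _ => pv_len_le_9 w hw)
      have hA := pv_stepA rest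
      rw [hkey] at hA
      have hW : pvWalkB pvPrefB rest [] 0 0 = pvBest rest := pv_walk_eq rest
      rw [pvLoopA.eq_def, pvLoopB.eq_def, dif_neg (by simpa using hne),
        dif_neg (by simpa using hne)]
      simp only [hW]
      unfold pvBest
      simp only [pvHit]
      rcases hfind : (pvDesc 9).find? (fun k => pvV.contains (rest.take k)) with _ | L
      · -- no match at this position: both advance by one
        rw [hfind] at hA
        rw [Option.map_none] at hA
        split
        · next w heq =>
          rw [hA] at heq
          simp at heq
        · next heq =>
          show pvLoopA (rest.drop 1) = pvLoopB (rest.drop 1)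
          exact ih _ (by simp only [List.length_drop]; omega)
      · -- a match of (clamped) length min L |rest|
        rw [hfind] at hA
        simp only [Option.map_some] at hA
        obtain ⟨hL1, hL9, _, _⟩ := (pv_find_desc_some _ _ _).mp hfind
        have hred : (match some L with
            | none => 0
            | some L => min L rest.length) = min L rest.length := rfl
        rw [hred]
        have hpos : 0 < min L rest.length := by omega
        rw [dif_pos hpos]
        split
        · next w heq =>
          rw [hA] at heq
          injection heq with hw
          subst hw
          rw [pv_take_min]
          congr 1
          have hll : (String.ofList (rest.take L)).toList.length = min L rest.length := by
            simp [List.length_take]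
          rw [hll]
          exact ih _ (by simp only [List.length_drop]; omega)
        · next heq =>
          rw [hA] at heq
          simp at heq

theorem pv_loop_eq (rest : List Char) : pvLoopA rest = pvLoopB rest :=
  pv_loop_eq_fuel rest.length rest le_rfl

-- ===== VERDICT (by name: the statement is the Claim_ definition above) =====
theorem tokenize_v2_spec : Claim_equal_tokenize_v2 := by
  intro text _
  unfold Spec_tokenize_v2 tokenize_v2 tokenize_v2_alt
  exact pv_loop_eq _
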